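-- pv_equiv track=rewrite | github.com/vikas9905/python_algo | Dynamic_programming/min_cost_in_matrix.py | Find_cost
-- ===== SOURCE A (Python) =====
-- def Find_cost(cost_mat,src,dest):
-- 	r=len(cost_mat)
-- 	c=len(cost_mat[0])
-- 	table=[[0]*c for _ in range(r)]
-- 	table[0][0]=max(cost_mat[0])#[0]
-- 	for i in range(1,src+1):
-- 		table[i][0]=table[i-1][0]+cost_mat[i][0]
-- 	for i in range(1,dest+1):
-- 		table[0][i]=table[0][i-1]+cost_mat[0][i]
-- 	for i in range(1,src+1):
-- 		for j in range(1,dest+1):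
-- 			table[i][j]=max(table[i][j-1],table[i-1][j],table[i-1][j-1])+cost_mat[i][j]
-- 	return table[src][dest]
-- ===== SOURCE B (Python) =====
-- def Find_cost(cost_mat, src, dest):
--     # top-down: memoized evaluation of the recurrence, driven by an explicit
--     # work stack (demand-driven; only cells the target depends on are computed)
--     memo = {}
--     stack = [(src, dest)]
--     while stack:
--         i, j = stack[-1]
--         if (i, j) in memo:
--             stack.pop()
--         elif i == 0 and j == 0:
--             memo[(0, 0)] = max(cost_mat[0])
--             stack.pop()
--         else:
--             if j == 0:
--                 deps = [(i - 1, 0)]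
--             elif i == 0:
--                 deps = [(0, j - 1)]
--             else:
--                 deps = [(i, j - 1), (i - 1, j), (i - 1, j - 1)]
--             missing = [d for d in deps if d not in memo]
--             if missing:
--                 stack.extend(missing)
--             else:
--                 memo[(i, j)] = max(memo[d] for d in deps) + cost_mat[i][j]
--                 stack.pop()
--     return memo[(src, dest)]
-- ===== Notes on version B (the rewrite author's own statement) =====
-- stated objective: alternative
-- what changed: Replaces A's bottom-up row-by-row table fill with demand-driven top-down memoized evaluation of the same recurrence, run with an explicit work stack and a memo dict, so only cells the target (src,dest) depends on are ever computed and no 2-D table is built. Pre_ restricts to the natural domain 0 <= src < len(cost_mat), 0 <= dest within the used rows: on negative src/dest A returns accidental values of the partly-filled table (untouched zeros / negative-index wraparound) while B's demand-driven descent never reaches its base case there and diverges.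
-- outside the precondition, e.g. on Find_cost([[1, 2], [3, 4]], -1, -1): A returns 0, B does not finish within the time limit; on Find_cost([[1, 2], [3, 4]], -1, 1): A returns 0, B does not finish within the time limit
import Mathlib
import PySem

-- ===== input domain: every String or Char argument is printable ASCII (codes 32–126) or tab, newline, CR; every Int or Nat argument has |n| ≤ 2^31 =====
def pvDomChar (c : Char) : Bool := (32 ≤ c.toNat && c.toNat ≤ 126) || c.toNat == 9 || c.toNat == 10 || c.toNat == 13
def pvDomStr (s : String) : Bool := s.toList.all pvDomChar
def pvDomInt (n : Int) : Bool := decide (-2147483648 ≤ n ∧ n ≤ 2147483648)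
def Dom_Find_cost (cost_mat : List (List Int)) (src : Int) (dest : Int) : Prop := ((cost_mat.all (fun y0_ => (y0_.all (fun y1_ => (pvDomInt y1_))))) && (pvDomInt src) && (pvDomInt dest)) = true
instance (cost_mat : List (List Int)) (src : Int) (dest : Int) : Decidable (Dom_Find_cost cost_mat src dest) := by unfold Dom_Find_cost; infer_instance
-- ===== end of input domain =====

-- B replaces A's bottom-up row-by-row table fill with demand-driven top-down memoized
-- evaluation of the same recurrence, run with an explicit work stack and a memo dict
-- (no 2-D table); equal return values on Pre_.

-- ===== PORT A =====
def Find_cost (cost_mat : List (List Int)) (src : Int) (dest : Int) : Int :=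
  let r := cost_mat.length
  let c := (PySem.List.pyGetD cost_mat 0 []).length
  -- table = [[0]*c for _ in range(r)]
  let table : List (List Int) := (List.range r).map (fun _ => List.replicate c (0 : Int))
  -- table[0][0] = max(cost_mat[0])
  let table := PySem.List.pySetD table 0 (PySem.List.pySetD (PySem.List.pyGetD table 0 []) 0
      ((PySem.List.max? (PySem.List.pyGetD cost_mat 0 []) (fun x => x)).getD 0))
  -- for i in range(1, src+1): table[i][0] = table[i-1][0] + cost_mat[i][0]
  let table := (PySem.List.pyRange 1 (src + 1) 1).foldl (fun table i =>
      PySem.List.pySetD table i (PySem.List.pySetD (PySem.List.pyGetD table i []) 0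
        (PySem.List.pyGetD (PySem.List.pyGetD table (i - 1) []) 0 0
          + PySem.List.pyGetD (PySem.List.pyGetD cost_mat i []) 0 0))) table
  -- for i in range(1, dest+1): table[0][i] = table[0][i-1] + cost_mat[0][i]
  let table := (PySem.List.pyRange 1 (dest + 1) 1).foldl (fun table i =>
      PySem.List.pySetD table 0 (PySem.List.pySetD (PySem.List.pyGetD table 0 []) i
        (PySem.List.pyGetD (PySem.List.pyGetD table 0 []) (i - 1) 0
          + PySem.List.pyGetD (PySem.List.pyGetD cost_mat 0 []) i 0))) table
  -- nested loops
  let table := (PySem.List.pyRange 1 (src + 1) 1).foldl (fun table i =>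
      (PySem.List.pyRange 1 (dest + 1) 1).foldl (fun table j =>
        PySem.List.pySetD table i (PySem.List.pySetD (PySem.List.pyGetD table i []) j
          (max (max (PySem.List.pyGetD (PySem.List.pyGetD table i []) (j - 1) 0)
                    (PySem.List.pyGetD (PySem.List.pyGetD table (i - 1) []) j 0))
               (PySem.List.pyGetD (PySem.List.pyGetD table (i - 1) []) (j - 1) 0)
            + PySem.List.pyGetD (PySem.List.pyGetD cost_mat i []) j 0))) table) table
  PySem.List.pyGetD (PySem.List.pyGetD table src []) dest 0

-- ===== PORT B =====
-- helpers of Source B's loop body: the dependency list of a non-base cell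
def pvDepsB (i j : Int) : List (Int × Int) :=
  if j = 0 then [(i - 1, 0)]
  else if i = 0 then [(0, j - 1)]
  else [(i, j - 1), (i - 1, j), (i - 1, j - 1)]

-- Source B's 'while stack:' loop. The Python stack's top is its list END; here the stack is
-- held top-at-head (so stack.extend(missing) is 'missing.reverse ++ ·', stack[-1] the head,
-- stack.pop() the tail) — same contents, same processing order. The fuel argument only
-- makes the loop total in Lean (proved sufficient below); the Python loop is unbounded.
def pvLoopB (m : List (List Int)) : Nat → PySem.Dict (Int × Int) Int → List (Int × Int) → PySem.Dict (Int × Int) Int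
  | 0, memo, _ => memo
  | _ + 1, memo, [] => memo
  | fuel + 1, memo, p :: rest =>
      if memo.contains p then
        pvLoopB m fuel memo rest
      else if p.1 = 0 ∧ p.2 = 0 then
        pvLoopB m fuel
          (memo.insert p ((PySem.List.max? (PySem.List.pyGetD m 0 []) (fun x => x)).getD 0)) rest
      else
        let deps := pvDepsB p.1 p.2
        let missing := deps.filter (fun q => !(memo.contains q))
        if missing ≠ [] then
          pvLoopB m fuel memo (missing.reverse ++ p :: rest)
        else
          pvLoopB m fuel
            (memo.insert p ((PySem.List.max? (deps.map (fun q => memo.getD q 0)) (fun x => x)).getD 0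
              + PySem.List.pyGetD (PySem.List.pyGetD m p.1 []) p.2 0)) rest

def Find_cost_alt (cost_mat : List (List Int)) (src : Int) (dest : Int) : Int :=
  (pvLoopB cost_mat (5 * ((src.toNat + 1) * (dest.toNat + 1)) + 2)
      PySem.Dict.empty [(src, dest)]).getD (src, dest) 0

-- ===== PRECONDITION & SPEC =====
-- Pre_ restricts to the task's natural domain: in-range, non-negative indices and rows long enough.
-- Outside it A either raises (IndexError / max() of empty row) or, for negative src/dest, returns an
-- accidental value of the partly-filled table (untouched zeros / negative-index wraparound).
def Pre_Find_cost (cost_mat : List (List Int)) (src : Int) (dest : Int) : Prop :=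
  0 ≤ src ∧ src < (cost_mat.length : Int) ∧ 0 ≤ dest ∧
    ∀ i : Nat, i ≤ src.toNat → dest < ((cost_mat.getD i []).length : Int)
instance (cost_mat : List (List Int)) (src : Int) (dest : Int) : Decidable (Pre_Find_cost cost_mat src dest) := by
  unfold Pre_Find_cost; infer_instance

def pvWitness_Find_cost : List (List Int) × Int × Int := ([[1, 2], [3, 4]], 1, 1)

def Spec_Find_cost (cost_mat : List (List Int)) (src : Int) (dest : Int) (out : Int) : Prop :=
  out = Find_cost_alt cost_mat src dest
instance (cost_mat : List (List Int)) (src : Int) (dest : Int) (out : Int) : Decidable (Spec_Find_cost cost_mat src dest out) := by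
  unfold Spec_Find_cost; infer_instance

-- ===== CLAIM (what is proved, stated in full; the proofs are below) =====
def Claim_equal_Find_cost : Prop := ∀ (cost_mat : List (List Int)) (src : Int) (dest : Int), Dom_Find_cost cost_mat src dest → Pre_Find_cost cost_mat src dest → Spec_Find_cost cost_mat src dest (Find_cost cost_mat src dest)

-- ===== LEMMAS AND PROOFS =====

/-- the matrix entry cost_mat[i][j] (0 out of range; only used in range) -/
def pvEnt (m : List (List Int)) (i j : Nat) : Int := (m.getD i []).getD j 0

/-- the seed value max(cost_mat[0]) -/
def pvSeed (m : List (List Int)) : Int :=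
  (PySem.List.max? (m.getD 0 []) (fun x => x)).getD 0

/-- the DP recurrence both programs compute -/
def pvG (m : List (List Int)) : Nat → Nat → Int
  | 0, 0 => pvSeed m
  | i + 1, 0 => pvG m i 0 + pvEnt m (i + 1) 0
  | 0, j + 1 => pvG m 0 j + pvEnt m 0 (j + 1)
  | i + 1, j + 1 =>
      max (max (pvG m (i + 1) j) (pvG m i (j + 1))) (pvG m i j) + pvEnt m (i + 1) (j + 1)

lemma pvG_congr (m : List (List Int)) {a b a' b' : Nat} (ha : a = a') (hb : b = b') :
    pvG m a b = pvG m a' b' := by subst ha; subst hb; rfl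

/-- abstract r×c table with entry function f -/
def pvTbl (r c : Nat) (f : Nat → Nat → Int) : List (List Int) :=
  (List.range r).map (fun i => (List.range c).map (fun j => f i j))

-- table entry functions after each stage of A
def pvF1 (m : List (List Int)) (n : Nat) : Nat → Nat → Int :=
  fun a b => if b = 0 ∧ a ≤ n then pvG m a 0 else 0
def pvF2 (m : List (List Int)) (s n : Nat) : Nat → Nat → Int :=
  fun a b => if a = 0 ∧ b ≤ n then pvG m 0 b else pvF1 m s a b
def pvF3 (m : List (List Int)) (s d n : Nat) : Nat → Nat → Int :=
  fun a b => if 1 ≤ a ∧ a ≤ n ∧ 1 ≤ b ∧ b ≤ d then pvG m a b else pvF2 m s d a b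
def pvF3i (m : List (List Int)) (s d i t : Nat) : Nat → Nat → Int :=
  fun a b => if a = i ∧ 1 ≤ b ∧ b ≤ t then pvG m a b else pvF3 m s d (i - 1) a b

lemma pvGetD_nonneg {α : Type} (xs : List α) (i : Int) (d : α) (h : 0 ≤ i) :
    PySem.List.pyGetD xs i d = xs.getD i.toNat d := by
  have e : i = ((i.toNat : Nat) : Int) := by omega
  conv_lhs => rw [e, PySem.List.pyGetD_natCast]

lemma pvSetD_nonneg {α : Type} (xs : List α) (i : Int) (v : α) (h : 0 ≤ i) :
    PySem.List.pySetD xs i v = xs.set i.toNat v := by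
  have e : i = ((i.toNat : Nat) : Int) := by omega
  conv_lhs => rw [e, PySem.List.pySetD_natCast]

lemma pvEnt_read (m : List (List Int)) (i j : Int) (hi : 0 ≤ i) (hj : 0 ≤ j) :
    PySem.List.pyGetD (PySem.List.pyGetD m i []) j 0 = pvEnt m i.toNat j.toNat := by
  rw [pvGetD_nonneg m i [] hi, pvGetD_nonneg _ j 0 hj]; rfl

lemma pv_set_map_range {α : Type} (f : Nat → α) (n i : Nat) (v : α) (h : i < n) :
    ((List.range n).map f).set i v = (List.range n).map (fun a => if a = i then v else f a) := by
  apply List.ext_getElem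
  · simp
  · simp only [List.length_map, List.length_range, List.getElem_set, List.getElem_map,
      List.getElem_range]
    intro j hj hj'
    split_ifs <;> first | rfl | omega

lemma pvTbl_congr (r c : Nat) (f g : Nat → Nat → Int) (h : ∀ a b, f a b = g a b) :
    pvTbl r c f = pvTbl r c g := by
  unfold pvTbl
  apply List.map_congr_left
  intro a _
  apply List.map_congr_left
  intro b _
  exact h a b

lemma pvTbl_row (r c : Nat) (f : Nat → Nat → Int) (i : Int) (h0 : 0 ≤ i) (hi : i.toNat < r) :
    PySem.List.pyGetD (pvTbl r c f) i [] = (List.range c).map (fun j => f i.toNat j) := by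
  rw [pvGetD_nonneg _ i [] h0]
  unfold pvTbl
  exact PySem.List.getD_map_range _ _ _ _ hi

lemma pvRow_entry (c : Nat) (g : Nat → Int) (j : Int) (h0 : 0 ≤ j) (hj : j.toNat < c) :
    PySem.List.pyGetD ((List.range c).map g) j 0 = g j.toNat := by
  rw [pvGetD_nonneg _ j 0 h0]
  exact PySem.List.getD_map_range _ _ _ _ hj

lemma pvTbl_read (r c : Nat) (f : Nat → Nat → Int) (i j : Int) (h0 : 0 ≤ i) (h1 : 0 ≤ j)
    (hi : i.toNat < r) (hj : j.toNat < c) :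
    PySem.List.pyGetD (PySem.List.pyGetD (pvTbl r c f) i []) j 0 = f i.toNat j.toNat := by
  rw [pvTbl_row r c f i h0 hi, pvRow_entry c _ j h1 hj]

lemma pvTbl_write (r c : Nat) (f : Nat → Nat → Int) (i j : Int) (v : Int)
    (h0 : 0 ≤ i) (h1 : 0 ≤ j) (hi : i.toNat < r) (hj : j.toNat < c) :
    PySem.List.pySetD (pvTbl r c f) i
      (PySem.List.pySetD (PySem.List.pyGetD (pvTbl r c f) i []) j v)
    = pvTbl r c (fun a b => if a = i.toNat ∧ b = j.toNat then v else f a b) := by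
  rw [pvTbl_row r c f i h0 hi, pvSetD_nonneg _ j v h1, pvSetD_nonneg _ i _ h0,
    pv_set_map_range _ _ _ _ hj]
  unfold pvTbl
  rw [pv_set_map_range _ _ _ _ hi]
  apply List.map_congr_left
  intro a _
  by_cases ha : a = i.toNat
  · subst ha
    rw [if_pos rfl]
    apply List.map_congr_left
    intro b _
    by_cases hb : b = j.toNat
    · subst hb
      show (if j.toNat = j.toNat then v else f i.toNat j.toNat)
        = if i.toNat = i.toNat ∧ j.toNat = j.toNat then v else f i.toNat j.toNat
      rw [if_pos rfl, if_pos ⟨rfl, rfl⟩]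
    · show (if b = j.toNat then v else f i.toNat b)
        = if i.toNat = i.toNat ∧ b = j.toNat then v else f i.toNat b
      rw [if_neg hb, if_neg (by tauto)]
  · rw [if_neg ha]
    apply List.map_congr_left
    intro b _
    show f a b = if a = i.toNat ∧ b = j.toNat then v else f a b
    rw [if_neg (by tauto)]

lemma pvRange_one_eq (n : Nat) :
    PySem.List.pyRange 1 ((n : Int) + 1) 1
      = (List.range n).map (fun k : Nat => ((k : Int) + 1)) := by
  induction n with
  | zero => decide
  | succ n ih =>
    rw [show (((n + 1 : Nat) : Int) + 1) = ((n : Int) + 1) + 1 by push_cast; ring,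
      PySem.List.pyRange_one_succ_right (by omega), ih, List.range_succ, List.map_append]
    simp

lemma pv_map_const_zero (c : Nat) :
    (List.range c).map (fun _ => (0 : Int)) = List.replicate c (0 : Int) := by
  simp

-- ===== stage lemmas for A =====

lemma pvLoopA1 (m : List (List Int)) (r c s : Nat) (hr : s < r) (hc : 0 < c)
    (n : Nat) (hn : n ≤ s) :
    ((List.range n).map (fun k : Nat => ((k : Int) + 1))).foldl (fun table i =>
      PySem.List.pySetD table i (PySem.List.pySetD (PySem.List.pyGetD table i []) 0
        (PySem.List.pyGetD (PySem.List.pyGetD table (i - 1) []) 0 0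
          + PySem.List.pyGetD (PySem.List.pyGetD m i []) 0 0)))
      (pvTbl r c (pvF1 m 0))
    = pvTbl r c (pvF1 m n) := by
  induction n with
  | zero => rfl
  | succ n ih =>
    rw [List.range_succ, List.map_append, List.foldl_append, ih (by omega)]
    simp only [List.map_cons, List.map_nil, List.foldl_cons, List.foldl_nil]
    have e1 : ((n : Int) + 1) - 1 = (n : Int) := by ring
    have t1 : ((n : Int) + 1).toNat = n + 1 := by omega
    have t2 : ((n : Int)).toNat = n := by omega
    rw [e1, pvTbl_read r c (pvF1 m n) (n : Int) 0 (by omega) (by omega) (by omega) (by omega),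
      pvEnt_read m ((n : Int) + 1) 0 (by omega) (by omega),
      pvTbl_write r c (pvF1 m n) ((n : Int) + 1) 0 _ (by omega) (by omega)
        (by omega) (by omega),
      t1, t2]
    have hv : pvF1 m n n (0 : Int).toNat + pvEnt m (n + 1) (0 : Int).toNat
        = pvG m (n + 1) 0 := by simp [pvF1, pvG]
    rw [hv]
    apply pvTbl_congr
    intro a b
    simp only [pvF1, Int.toNat_zero]
    split_ifs <;> first | rfl | (exfalso; omega) | (exact pvG_congr m (by omega) (by omega))

lemma pvLoopA2 (m : List (List Int)) (r c s : Nat) (hr : s < r) (hc : 0 < c)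
    (n : Nat) (hn : n < c) :
    ((List.range n).map (fun k : Nat => ((k : Int) + 1))).foldl (fun table i =>
      PySem.List.pySetD table 0 (PySem.List.pySetD (PySem.List.pyGetD table 0 []) i
        (PySem.List.pyGetD (PySem.List.pyGetD table 0 []) (i - 1) 0
          + PySem.List.pyGetD (m.getD 0 []) i 0)))
      (pvTbl r c (pvF1 m s))
    = pvTbl r c (pvF2 m s n) := by
  induction n with
  | zero =>
    simp only [List.range_zero, List.map_nil, List.foldl_nil]
    apply pvTbl_congr
    intro a b
    simp only [pvF2, pvF1]
    split_ifs <;> first | rfl | (exfalso; omega) | (exact pvG_congr m (by omega) (by omega))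
  | succ n ih =>
    rw [List.range_succ, List.map_append, List.foldl_append, ih (by omega)]
    simp only [List.map_cons, List.map_nil, List.foldl_cons, List.foldl_nil]
    have e1 : ((n : Int) + 1) - 1 = (n : Int) := by ring
    have t1 : ((n : Int) + 1).toNat = n + 1 := by omega
    have t2 : ((n : Int)).toNat = n := by omega
    rw [e1, pvTbl_read r c (pvF2 m s n) 0 (n : Int) (by omega) (by omega) (by omega) (by omega),
      pvGetD_nonneg (m.getD 0 []) ((n : Int) + 1) 0 (by omega),
      pvTbl_write r c (pvF2 m s n) 0 ((n : Int) + 1) _ (by omega) (by omega)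
        (by omega) (by omega),
      t1, t2]
    have hv : pvF2 m s n (0 : Int).toNat n + (m.getD 0 []).getD (n + 1) 0
        = pvG m 0 (n + 1) := by
      cases n <;> simp [pvF2, pvG, pvEnt]
    rw [hv]
    apply pvTbl_congr
    intro a b
    simp only [pvF2, pvF1, Int.toNat_zero]
    split_ifs <;> first | rfl | (exfalso; omega) | (exact pvG_congr m (by omega) (by omega))

lemma pvLoopA3inner (m : List (List Int)) (r c s d k : Nat) (hr : s < r) (hc : d < c)
    (hk : k + 1 ≤ s) (n : Nat) (hn : n ≤ d) :
    ((List.range n).map (fun kk : Nat => ((kk : Int) + 1))).foldl (fun table j =>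
      PySem.List.pySetD table ((k : Int) + 1)
        (PySem.List.pySetD (PySem.List.pyGetD table ((k : Int) + 1) []) j
          (max (max (PySem.List.pyGetD (PySem.List.pyGetD table ((k : Int) + 1) []) (j - 1) 0)
                    (PySem.List.pyGetD (PySem.List.pyGetD table (((k : Int) + 1) - 1) []) j 0))
               (PySem.List.pyGetD (PySem.List.pyGetD table (((k : Int) + 1) - 1) []) (j - 1) 0)
            + PySem.List.pyGetD (PySem.List.pyGetD m ((k : Int) + 1) []) j 0)))
      (pvTbl r c (pvF3i m s d (k + 1) 0))
    = pvTbl r c (pvF3i m s d (k + 1) n) := by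
  induction n with
  | zero => rfl
  | succ n ih =>
    rw [List.range_succ, List.map_append, List.foldl_append, ih (by omega)]
    simp only [List.map_cons, List.map_nil, List.foldl_cons, List.foldl_nil]
    have e0 : ((k : Int) + 1) - 1 = (k : Int) := by ring
    have e1 : ((n : Int) + 1) - 1 = (n : Int) := by ring
    have t1 : ((n : Int) + 1).toNat = n + 1 := by omega
    have t2 : ((n : Int)).toNat = n := by omega
    have t3 : ((k : Int) + 1).toNat = k + 1 := by omega
    have t4 : ((k : Int)).toNat = k := by omega
    rw [e0, e1,
      pvTbl_read r c (pvF3i m s d (k + 1) n) ((k : Int) + 1) (n : Int)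
        (by omega) (by omega) (by omega) (by omega),
      pvTbl_read r c (pvF3i m s d (k + 1) n) (k : Int) ((n : Int) + 1)
        (by omega) (by omega) (by omega) (by omega),
      pvTbl_read r c (pvF3i m s d (k + 1) n) (k : Int) (n : Int)
        (by omega) (by omega) (by omega) (by omega),
      pvEnt_read m ((k : Int) + 1) ((n : Int) + 1) (by omega) (by omega),
      pvTbl_write r c (pvF3i m s d (k + 1) n) ((k : Int) + 1) ((n : Int) + 1) _
        (by omega) (by omega) (by omega) (by omega),
      t1, t2, t3, t4]
    have h1 : pvF3i m s d (k + 1) n (k + 1) n = pvG m (k + 1) n := by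
      rcases n with _ | t
      · unfold pvF3i pvF3 pvF2 pvF1
        rw [if_neg (show ¬(k + 1 = k + 1 ∧ 1 ≤ 0 ∧ 0 ≤ 0) by omega),
          if_neg (show ¬(1 ≤ k + 1 ∧ k + 1 ≤ k + 1 - 1 ∧ 1 ≤ 0 ∧ 0 ≤ d) by omega),
          if_neg (show ¬(k + 1 = 0 ∧ 0 ≤ d) by omega),
          if_pos (show (0 = 0 ∧ k + 1 ≤ s) by omega)]
      · unfold pvF3i pvF3 pvF2 pvF1
        rw [if_pos (show (k + 1 = k + 1 ∧ 1 ≤ t + 1 ∧ t + 1 ≤ t + 1) by omega)]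
    have h2 : pvF3i m s d (k + 1) n k (n + 1) = pvG m k (n + 1) := by
      rcases k with _ | t
      · unfold pvF3i pvF3 pvF2 pvF1
        rw [if_neg (show ¬(0 = 0 + 1 ∧ 1 ≤ n + 1 ∧ n + 1 ≤ n) by omega),
          if_neg (show ¬(1 ≤ 0 ∧ 0 ≤ 0 + 1 - 1 ∧ 1 ≤ n + 1 ∧ n + 1 ≤ d) by omega),
          if_pos (show (0 = 0 ∧ n + 1 ≤ d) by omega)]
      · unfold pvF3i pvF3 pvF2 pvF1
        rw [if_neg (show ¬(t + 1 = t + 1 + 1 ∧ 1 ≤ n + 1 ∧ n + 1 ≤ n) by omega),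
          if_pos (show (1 ≤ t + 1 ∧ t + 1 ≤ t + 1 + 1 - 1 ∧ 1 ≤ n + 1 ∧ n + 1 ≤ d) by omega)]
    have h3 : pvF3i m s d (k + 1) n k n = pvG m k n := by
      rcases k with _ | t
      · unfold pvF3i pvF3 pvF2 pvF1
        rw [if_neg (show ¬(0 = 0 + 1 ∧ 1 ≤ n ∧ n ≤ n) by omega),
          if_neg (show ¬(1 ≤ 0 ∧ 0 ≤ 0 + 1 - 1 ∧ 1 ≤ n ∧ n ≤ d) by omega),
          if_pos (show (0 = 0 ∧ n ≤ d) by omega)]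
      · rcases n with _ | u
        · unfold pvF3i pvF3 pvF2 pvF1
          rw [if_neg (show ¬(t + 1 = t + 1 + 1 ∧ 1 ≤ 0 ∧ 0 ≤ 0) by omega),
            if_neg (show ¬(1 ≤ t + 1 ∧ t + 1 ≤ t + 1 + 1 - 1 ∧ 1 ≤ 0 ∧ 0 ≤ d) by omega),
            if_neg (show ¬(t + 1 = 0 ∧ 0 ≤ d) by omega),
            if_pos (show (0 = 0 ∧ t + 1 ≤ s) by omega)]
        · unfold pvF3i pvF3 pvF2 pvF1
          rw [if_neg (show ¬(t + 1 = t + 1 + 1 ∧ 1 ≤ u + 1 ∧ u + 1 ≤ u + 1) by omega),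
            if_pos (show (1 ≤ t + 1 ∧ t + 1 ≤ t + 1 + 1 - 1 ∧ 1 ≤ u + 1 ∧ u + 1 ≤ d) by omega)]
    rw [h1, h2, h3]
    have hv : max (max (pvG m (k + 1) n) (pvG m k (n + 1))) (pvG m k n)
        + pvEnt m (k + 1) (n + 1) = pvG m (k + 1) (n + 1) := by simp [pvG]
    rw [hv]
    apply pvTbl_congr
    intro a b
    simp only [pvF3i]
    split_ifs <;> first | rfl | (exfalso; omega) | (exact pvG_congr m (by omega) (by omega))

lemma pvLoopA3 (m : List (List Int)) (r c s d : Nat) (hr : s < r) (hc : d < c)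
    (n : Nat) (hn : n ≤ s) :
    ((List.range n).map (fun k : Nat => ((k : Int) + 1))).foldl (fun table i =>
      ((List.range d).map (fun kk : Nat => ((kk : Int) + 1))).foldl (fun table j =>
        PySem.List.pySetD table i (PySem.List.pySetD (PySem.List.pyGetD table i []) j
          (max (max (PySem.List.pyGetD (PySem.List.pyGetD table i []) (j - 1) 0)
                    (PySem.List.pyGetD (PySem.List.pyGetD table (i - 1) []) j 0))
               (PySem.List.pyGetD (PySem.List.pyGetD table (i - 1) []) (j - 1) 0)
            + PySem.List.pyGetD (PySem.List.pyGetD m i []) j 0))) table)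
      (pvTbl r c (pvF2 m s d))
    = pvTbl r c (pvF3 m s d n) := by
  induction n with
  | zero =>
    simp only [List.range_zero, List.map_nil, List.foldl_nil]
    apply pvTbl_congr
    intro a b
    simp only [pvF3]
    rw [if_neg (by omega)]
  | succ n ih =>
    rw [List.range_succ, List.map_append, List.foldl_append, ih (by omega)]
    simp only [List.map_cons, List.map_nil, List.foldl_cons, List.foldl_nil]
    have hstart : pvTbl r c (pvF3 m s d n) = pvTbl r c (pvF3i m s d (n + 1) 0) := by
      apply pvTbl_congr
      intro a b
      simp only [pvF3i, pvF3]
      split_ifs <;> first | rfl | (exfalso; omega)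
    rw [hstart, pvLoopA3inner m r c s d n hr hc (by omega) d (le_refl d)]
    apply pvTbl_congr
    intro a b
    simp only [pvF3i, pvF3]
    split_ifs <;> first | rfl | (exfalso; omega)

lemma pvA_eq (m : List (List Int)) (s d : Nat) (hsr : s < m.length)
    (hrow : ∀ i : Nat, i ≤ s → d < (m.getD i []).length) :
    Find_cost m (s : Int) (d : Int) = pvG m s d := by
  have hdc : d < (m.getD 0 []).length := hrow 0 (by omega)
  simp only [Find_cost]
  rw [show (PySem.List.pyGetD m 0 []) = m.getD 0 [] from PySem.List.pyGetD_zero _ _]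
  rw [show ((List.range m.length).map (fun _ => List.replicate (m.getD 0 []).length (0 : Int)))
        = pvTbl m.length (m.getD 0 []).length (fun _ _ => 0) by
      unfold pvTbl
      apply List.map_congr_left
      intro a _
      rw [pv_map_const_zero]]
  rw [pvTbl_write m.length (m.getD 0 []).length (fun _ _ => 0) 0 0 _ (by omega) (by omega)
      (by omega) (by omega)]
  rw [show (pvTbl m.length (m.getD 0 []).length
        (fun a b => if a = (0 : Int).toNat ∧ b = (0 : Int).toNat
          then (PySem.List.max? (m.getD 0 []) (fun x => x)).getD 0
          else (fun _ _ => (0 : Int)) a b))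
      = pvTbl m.length (m.getD 0 []).length (pvF1 m 0) by
    apply pvTbl_congr
    intro a b
    simp only [pvF1, Int.toNat_zero]
    split_ifs <;> first | rfl | (exfalso; omega) |
      (obtain ⟨rfl, rfl⟩ := (by omega : a = 0 ∧ b = 0); simp [pvG, pvSeed])]
  rw [pvRange_one_eq s, pvRange_one_eq d,
    pvLoopA1 m m.length (m.getD 0 []).length s hsr (by omega) s (le_refl s),
    pvLoopA2 m m.length (m.getD 0 []).length s hsr (by omega) d hdc,
    pvLoopA3 m m.length (m.getD 0 []).length s d hsr hdc s (le_refl s),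
    pvTbl_read m.length (m.getD 0 []).length (pvF3 m s d s) (s : Int) (d : Int)
      (by omega) (by omega) (by omega) (by omega)]
  have ts : ((s : Int)).toNat = s := by omega
  have td : ((d : Int)).toNat = d := by omega
  rw [ts, td]
  simp only [pvF3, pvF2, pvF1]
  split_ifs <;> first | rfl | (exfalso; omega) | (exact pvG_congr m (by omega) (by omega))

-- ===== B-side lemmas: the stack machine computes pvG =====

/-- number of computed grid cells -/
def pvComp (s d : Nat) (memo : PySem.Dict (Int × Int) Int) : Nat :=
  ((Finset.range (s + 1) ×ˢ Finset.range (d + 1)).filter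
    (fun q => memo.contains ((q.1 : Int), (q.2 : Int)) = true)).card

/-- every memo entry is a correct in-grid value -/
def pvInv (m : List (List Int)) (s d : Nat) (memo : PySem.Dict (Int × Int) Int) : Prop :=
  ∀ p v, memo.get? p = some v →
    ∃ a b : Nat, p = ((a : Int), (b : Int)) ∧ a ≤ s ∧ b ≤ d ∧ v = pvG m a b

/-- memo extension (lookups preserved) -/
def pvLe (memo memo' : PySem.Dict (Int × Int) Int) : Prop :=
  ∀ p v, memo.get? p = some v → memo'.get? p = some v

lemma pvLe_contains {memo memo' : PySem.Dict (Int × Int) Int} (h : pvLe memo memo')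
    (p : Int × Int) (hc : memo.contains p = true) : memo'.contains p = true := by
  rw [PySem.Dict.contains_eq_isSome_get?] at hc ⊢
  obtain ⟨v, hv⟩ := Option.isSome_iff_exists.mp hc
  rw [h p v hv]; rfl

lemma pvLe_insert (memo : PySem.Dict (Int × Int) Int) (p : Int × Int) (v : Int)
    (h : memo.contains p = false) : pvLe memo (memo.insert p v) := by
  intro q w hq
  rw [PySem.Dict.get?_insert]
  split_ifs with he
  · subst he
    rw [PySem.Dict.contains_eq_isSome_get?, hq] at h
    simp at h
  · exact hq

lemma pvComp_mono (s d : Nat) {memo memo' : PySem.Dict (Int × Int) Int}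
    (h : ∀ q, memo.contains q = true → memo'.contains q = true) :
    pvComp s d memo ≤ pvComp s d memo' := by
  apply Finset.card_le_card
  intro q hq
  simp only [Finset.mem_filter] at hq ⊢
  exact ⟨hq.1, h _ hq.2⟩

lemma pvComp_le_total (s d : Nat) (memo : PySem.Dict (Int × Int) Int) :
    pvComp s d memo ≤ (s + 1) * (d + 1) := by
  calc pvComp s d memo ≤ (Finset.range (s + 1) ×ˢ Finset.range (d + 1)).card :=
        Finset.card_filter_le _ _
    _ = (s + 1) * (d + 1) := by simp

lemma pvComp_lt (s d : Nat) {memo memo' : PySem.Dict (Int × Int) Int}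
    (h : ∀ q, memo.contains q = true → memo'.contains q = true)
    (a b : Nat) (ha : a ≤ s) (hb : b ≤ d)
    (hold : memo.contains ((a : Int), (b : Int)) = false)
    (hnew : memo'.contains ((a : Int), (b : Int)) = true) :
    pvComp s d memo + 1 ≤ pvComp s d memo' := by
  apply Nat.succ_le_of_lt
  apply Finset.card_lt_card
  constructor
  · intro q hq
    simp only [Finset.mem_filter] at hq ⊢
    exact ⟨hq.1, h _ hq.2⟩
  · intro hsub
    have hmem : (a, b) ∈ (Finset.range (s + 1) ×ˢ Finset.range (d + 1)).filter
        (fun q => memo'.contains ((q.1 : Int), (q.2 : Int)) = true) := by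
      simp only [Finset.mem_filter, Finset.mem_product, Finset.mem_range]
      exact ⟨⟨by omega, by omega⟩, hnew⟩
    have := hsub hmem
    simp only [Finset.mem_filter] at this
    rw [this.2] at hold
    exact Bool.true_eq_false.mp hold


lemma pvInv_insert {m : List (List Int)} {s d : Nat} {memo : PySem.Dict (Int × Int) Int}
    (hInv : pvInv m s d memo) (a b : Nat) (ha : a ≤ s) (hb : b ≤ d) {v : Int}
    (hv : v = pvG m a b) : pvInv m s d (memo.insert ((a : Int), (b : Int)) v) := by
  intro p w hp
  rw [PySem.Dict.get?_insert] at hp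
  split_ifs at hp with he
  · obtain rfl : v = w := by injection hp
    exact ⟨a, b, he, ha, hb, hv⟩
  · exact hInv p w hp

/-- getD of a contained key under the invariant -/
lemma pvGetD_inv {m : List (List Int)} {s d : Nat} {memo : PySem.Dict (Int × Int) Int}
    (hInv : pvInv m s d memo) (x y : Nat)
    (hc : memo.contains ((x : Int), (y : Int)) = true) :
    memo.getD ((x : Int), (y : Int)) 0 = pvG m x y := by
  rw [PySem.Dict.contains_eq_isSome_get?] at hc
  obtain ⟨v, hv⟩ := Option.isSome_iff_exists.mp hc
  obtain ⟨a, b, hpe, _, _, hval⟩ := hInv _ _ hv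
  injection hpe with h1 h2
  have hx : a = x := by omega
  have hy : b = y := by omega
  rw [PySem.Dict.getD_eq_get?_getD, hv, Option.getD_some, hval, hx, hy]

lemma pvDeps_shape (a b : Nat) (hnz : ¬(a = 0 ∧ b = 0)) :
    ∀ q ∈ pvDepsB (a : Int) (b : Int),
      ∃ x y : Nat, q = ((x : Int), (y : Int)) ∧ x ≤ a ∧ y ≤ b ∧ x + y < a + b := by
  intro q hq
  unfold pvDepsB at hq
  split_ifs at hq with h1 h2
  · simp only [List.mem_singleton] at hq
    refine ⟨a - 1, 0, ?_, by omega, by omega, by omega⟩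
    rw [hq]
    simp only [Prod.mk.injEq]
    omega
  · simp only [List.mem_singleton] at hq
    refine ⟨0, b - 1, ?_, by omega, by omega, by omega⟩
    rw [hq]
    simp only [Prod.mk.injEq]
    omega
  · simp only [List.mem_cons, List.not_mem_nil, or_false] at hq
    rcases hq with hq | hq | hq
    · refine ⟨a, b - 1, ?_, by omega, by omega, by omega⟩
      rw [hq, Prod.mk.injEq]; constructor <;> omega
    · refine ⟨a - 1, b, ?_, by omega, by omega, by omega⟩
      rw [hq, Prod.mk.injEq]; constructor <;> omega
    · refine ⟨a - 1, b - 1, ?_, by omega, by omega, by omega⟩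
      rw [hq]; simp only [Prod.mk.injEq]; omega

lemma pvDeps_len (i j : Int) : (pvDepsB i j).length ≤ 3 := by
  unfold pvDepsB; split_ifs <;> simp

/-- value computed in the insert branch equals pvG -/
lemma pvVal {m : List (List Int)} {s d : Nat} {memo : PySem.Dict (Int × Int) Int}
    (hInv : pvInv m s d memo) (a b : Nat) (hnz : ¬(a = 0 ∧ b = 0))
    (hdeps : ∀ q ∈ pvDepsB (a : Int) (b : Int), memo.contains q = true) :
    (PySem.List.max? ((pvDepsB (a : Int) (b : Int)).map (fun q => memo.getD q 0))
        (fun x => x)).getD 0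
      + PySem.List.pyGetD (PySem.List.pyGetD m (a : Int) []) (b : Int) 0 = pvG m a b := by
  have hent : PySem.List.pyGetD (PySem.List.pyGetD m (a : Int) []) (b : Int) 0
      = pvEnt m a b := by
    rw [pvEnt_read m (a : Int) (b : Int) (by omega) (by omega),
      show ((a : Int)).toNat = a by omega, show ((b : Int)).toNat = b by omega]
  rcases Nat.eq_zero_or_pos b with hb | hb
  · subst hb
    obtain ⟨a', rfl⟩ : ∃ a', a = a' + 1 := ⟨a - 1, by omega⟩
    have hdep : pvDepsB ((a' + 1 : Nat) : Int) ((0 : Nat) : Int)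
        = [(((a' : Nat) : Int), ((0 : Nat) : Int))] := by
      unfold pvDepsB
      rw [if_pos (by simp : ((0 : Nat) : Int) = 0)]
      simp only [List.cons.injEq, Prod.mk.injEq, and_true]
      omega
    rw [hdep] at hdeps ⊢
    have hc := hdeps _ (List.mem_singleton.mpr rfl)
    rw [List.map_cons, List.map_nil, PySem.List.max?_id_cons, List.foldl_nil, Option.getD_some,
      pvGetD_inv hInv a' 0 hc, hent]
    simp [pvG]
  · rcases Nat.eq_zero_or_pos a with ha | ha
    · subst ha
      obtain ⟨b', rfl⟩ : ∃ b', b = b' + 1 := ⟨b - 1, by omega⟩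
      have hdep : pvDepsB ((0 : Nat) : Int) ((b' + 1 : Nat) : Int)
          = [(((0 : Nat) : Int), ((b' : Nat) : Int))] := by
        unfold pvDepsB
        rw [if_neg (by push_cast; omega), if_pos (by simp : ((0 : Nat) : Int) = 0)]
        simp only [List.cons.injEq, Prod.mk.injEq, and_true]
        constructor
        · simp
        · omega
      rw [hdep] at hdeps ⊢
      have hc := hdeps _ (List.mem_singleton.mpr rfl)
      rw [List.map_cons, List.map_nil, PySem.List.max?_id_cons, List.foldl_nil, Option.getD_some,
        pvGetD_inv hInv 0 b' hc, hent]
      simp [pvG]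
    · obtain ⟨a', rfl⟩ : ∃ a', a = a' + 1 := ⟨a - 1, by omega⟩
      obtain ⟨b', rfl⟩ : ∃ b', b = b' + 1 := ⟨b - 1, by omega⟩
      have hdep : pvDepsB ((a' + 1 : Nat) : Int) ((b' + 1 : Nat) : Int)
          = [(((a' + 1 : Nat) : Int), ((b' : Nat) : Int)),
             (((a' : Nat) : Int), ((b' + 1 : Nat) : Int)),
             (((a' : Nat) : Int), ((b' : Nat) : Int))] := by
        unfold pvDepsB
        rw [if_neg (by push_cast; omega), if_neg (by push_cast; omega)]
        push_cast
        norm_num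
      rw [hdep] at hdeps ⊢
      have hc1 := hdeps (((a' + 1 : Nat) : Int), ((b' : Nat) : Int)) (by simp)
      have hc2 := hdeps (((a' : Nat) : Int), ((b' + 1 : Nat) : Int)) (by simp)
      have hc3 := hdeps (((a' : Nat) : Int), ((b' : Nat) : Int)) (by simp)
      rw [List.map_cons, List.map_cons, List.map_cons, List.map_nil,
        PySem.List.max?_id_cons, Option.getD_some,
        pvGetD_inv hInv (a' + 1) b' hc1, pvGetD_inv hInv a' (b' + 1) hc2,
        pvGetD_inv hInv a' b' hc3, hent]
      show List.foldl max (pvG m (a' + 1) b') [pvG m a' (b' + 1), pvG m a' b'] + _ = _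
      simp only [List.foldl_cons, List.foldl_nil]
      simp [pvG]

lemma pvLoopB_nil (m : List (List Int)) (f : Nat) (memo : PySem.Dict (Int × Int) Int) :
    pvLoopB m f memo [] = memo := by cases f <;> rfl

lemma pvLoopB_cons (m : List (List Int)) (f : Nat) (memo : PySem.Dict (Int × Int) Int)
    (i j : Int) (rest : List (Int × Int)) :
    pvLoopB m (f + 1) memo ((i, j) :: rest) =
      if memo.contains (i, j) then pvLoopB m f memo rest
      else if i = 0 ∧ j = 0 then
        pvLoopB m f
          (memo.insert (i, j) ((PySem.List.max? (PySem.List.pyGetD m 0 []) (fun x => x)).getD 0)) rest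
      else
        if (pvDepsB i j).filter (fun q => !(memo.contains q)) ≠ [] then
          pvLoopB m f memo
            (((pvDepsB i j).filter (fun q => !(memo.contains q))).reverse ++ (i, j) :: rest)
        else
          pvLoopB m f
            (memo.insert (i, j)
              ((PySem.List.max? ((pvDepsB i j).map (fun q => memo.getD q 0)) (fun x => x)).getD 0
                + PySem.List.pyGetD (PySem.List.pyGetD m i []) j 0)) rest := rfl

/-- resolving the top stack cell: the machine pops it after n steps, with a correct,
    extended memo that now contains it; n is budgeted by the growth of the computed set -/
lemma pvResolve (m : List (List Int)) (s d : Nat) :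
    ∀ N : Nat, ∀ (a b : Nat) (memo : PySem.Dict (Int × Int) Int) (rest : List (Int × Int)),
      (s + d + 1) * ((s + 1) * (d + 1) - pvComp s d memo) + (a + b) < N →
      pvInv m s d memo → a ≤ s → b ≤ d →
      ∃ (memo' : PySem.Dict (Int × Int) Int) (n : Nat),
        pvInv m s d memo' ∧ pvLe memo memo' ∧
        memo'.contains ((a : Int), (b : Int)) = true ∧
        (∀ x y : Nat, memo.contains ((x : Int), (y : Int)) = false →
           memo'.contains ((x : Int), (y : Int)) = true → x ≤ a ∧ y ≤ b) ∧
        n + 5 * pvComp s d memo ≤ 1 + 5 * pvComp s d memo' ∧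
        (∀ fuel, pvLoopB m (fuel + n) memo (((a : Int), (b : Int)) :: rest)
          = pvLoopB m fuel memo' rest) := by
  intro N
  induction N with
  | zero => intro a b memo rest hlt; exact absurd hlt (Nat.not_lt_zero _)
  | succ N IH =>
    intro a b memo rest hlt hInv ha hb
    by_cases hcon : memo.contains ((a : Int), (b : Int)) = true
    · -- already computed: one step, pop
      refine ⟨memo, 1, hInv, fun p v h => h, hcon, ?_, by omega, ?_⟩
      · intro x y h0 h1; rw [h0] at h1; cases h1
      · intro fuel; rw [pvLoopB_cons, if_pos hcon]
    · have hc' : memo.contains ((a : Int), (b : Int)) = false := by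
        revert hcon; cases memo.contains ((a : Int), (b : Int)) <;> simp
      by_cases hz : a = 0 ∧ b = 0
      · -- base cell: one step, insert seed, pop
        obtain ⟨rfl, rfl⟩ := hz
        have hv : (PySem.List.max? (PySem.List.pyGetD m 0 []) (fun x => x)).getD 0
            = pvG m 0 0 := by
          rw [PySem.List.pyGetD_zero]; simp [pvG, pvSeed]
        have hmono : ∀ q, memo.contains q = true →
            (memo.insert (((0 : Nat) : Int), ((0 : Nat) : Int))
              ((PySem.List.max? (PySem.List.pyGetD m 0 []) (fun x => x)).getD 0)).contains q = true :=
          fun q hq => pvLe_contains (pvLe_insert memo _ _ hc') q hq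
        refine ⟨memo.insert (((0 : Nat) : Int), ((0 : Nat) : Int))
            ((PySem.List.max? (PySem.List.pyGetD m 0 []) (fun x => x)).getD 0), 1,
          pvInv_insert hInv 0 0 (by omega) (by omega) hv,
          pvLe_insert memo _ _ hc',
          PySem.Dict.contains_insert_self _ _ _, ?_, ?_, ?_⟩
        · intro x y h0 h1
          rw [PySem.Dict.contains_insert, h0, Bool.or_false] at h1
          have he := eq_of_beq h1
          injection he with e1 e2
          constructor <;> omega
        · have := pvComp_lt s d hmono 0 0 (by omega) (by omega) hc'
            (PySem.Dict.contains_insert_self _ _ _)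
          omega
        · intro fuel
          rw [pvLoopB_cons, if_neg (by simpa using hc'),
            if_pos (show ((0 : Nat) : Int) = 0 ∧ ((0 : Nat) : Int) = 0 by simp)]
      · have hzi : ¬(((a : Nat) : Int) = 0 ∧ ((b : Nat) : Int) = 0) := by omega
        by_cases hm : (pvDepsB ((a : Nat) : Int) ((b : Nat) : Int)).filter
            (fun q => !(memo.contains q)) = []
        · -- all dependencies computed: one step, insert value, pop
          have hdeps : ∀ q ∈ pvDepsB ((a : Nat) : Int) ((b : Nat) : Int),
              memo.contains q = true := by
            intro q hq
            have hnq := List.filter_eq_nil_iff.mp hm q hq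
            revert hnq; cases memo.contains q <;> simp
          have hv := pvVal hInv a b hz hdeps
          have hmono : ∀ q, memo.contains q = true →
              (memo.insert (((a : Nat) : Int), ((b : Nat) : Int))
                ((PySem.List.max? ((pvDepsB ((a : Nat) : Int) ((b : Nat) : Int)).map
                    (fun q => memo.getD q 0)) (fun x => x)).getD 0
                  + PySem.List.pyGetD (PySem.List.pyGetD m ((a : Nat) : Int) [])
                      ((b : Nat) : Int) 0)).contains q = true :=
            fun q hq => pvLe_contains (pvLe_insert memo _ _ hc') q hq
          refine ⟨_, 1,
            pvInv_insert hInv a b ha hb hv,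
            pvLe_insert memo _ _ hc',
            PySem.Dict.contains_insert_self _ _ _, ?_, ?_, ?_⟩
          · intro x y h0 h1
            rw [PySem.Dict.contains_insert, h0, Bool.or_false] at h1
            have he := eq_of_beq h1
            injection he with e1 e2
            constructor <;> omega
          · have := pvComp_lt s d hmono a b ha hb hc'
              (PySem.Dict.contains_insert_self _ _ _)
            omega
          · intro fuel
            rw [pvLoopB_cons, if_neg (by simp [hc']), if_neg hzi,
              if_neg (show ¬((pvDepsB ((a : Nat) : Int) ((b : Nat) : Int)).filter
                (fun q => !(memo.contains q)) ≠ []) from fun h => h hm)]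
        · -- some dependencies missing: push them, resolve them in turn, then compute
          have hLshape : ∀ q ∈ ((pvDepsB ((a : Nat) : Int) ((b : Nat) : Int)).filter
              (fun q => !(memo.contains q))).reverse,
              ∃ x y : Nat, q = ((x : Int), (y : Int)) ∧ x ≤ a ∧ y ≤ b ∧ x + y < a + b := by
            intro q hq
            rw [List.mem_reverse] at hq
            exact pvDeps_shape a b hz q (List.mem_of_mem_filter hq)
          -- sequential resolution of a list of proper sub-cells
          have hres : ∀ (L : List (Int × Int)),
              (∀ q ∈ L, ∃ x y : Nat, q = ((x : Int), (y : Int)) ∧ x ≤ a ∧ y ≤ b ∧ x + y < a + b) →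
              ∀ (memo₁ : PySem.Dict (Int × Int) Int) (tail : List (Int × Int)),
              pvInv m s d memo₁ → pvComp s d memo ≤ pvComp s d memo₁ →
              ∃ (memo₂ : PySem.Dict (Int × Int) Int) (n₂ : Nat),
                pvInv m s d memo₂ ∧ pvLe memo₁ memo₂ ∧
                (∀ q ∈ L, memo₂.contains q = true) ∧
                (∀ x y : Nat, memo₁.contains ((x : Int), (y : Int)) = false →
                   memo₂.contains ((x : Int), (y : Int)) = true →
                   x ≤ a ∧ y ≤ b ∧ ¬(x = a ∧ y = b)) ∧
                pvComp s d memo₁ ≤ pvComp s d memo₂ ∧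
                n₂ + 5 * pvComp s d memo₁ ≤ L.length + 5 * pvComp s d memo₂ ∧
                (∀ fuel, pvLoopB m (fuel + n₂) memo₁ (L ++ tail) = pvLoopB m fuel memo₂ tail) := by
            intro L
            induction L with
            | nil =>
              intro _ memo₁ tail hInv₁ hcomp₁
              refine ⟨memo₁, 0, hInv₁, fun p v h => h, by simp, ?_, le_refl _, by omega,
                fun fuel => rfl⟩
              intro x y h0 h1; rw [h0] at h1; cases h1
            | cons q L' IHL =>
              intro hshape memo₁ tail hInv₁ hcomp₁
              obtain ⟨x, y, rfl, hxa, hyb, hxy⟩ := hshape q (by simp)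
              have hmeas : (s + d + 1) * ((s + 1) * (d + 1) - pvComp s d memo₁) + (x + y) < N := by
                have hQP : (s + d + 1) * ((s + 1) * (d + 1) - pvComp s d memo₁)
                    ≤ (s + d + 1) * ((s + 1) * (d + 1) - pvComp s d memo) :=
                  Nat.mul_le_mul_left _ (Nat.sub_le_sub_left hcomp₁ _)
                omega
              obtain ⟨memo₂, n_q, hInv₂, hle₂, hcq, hcone₂, hbud₂, hrun₂⟩ :=
                IH x y memo₁ (L' ++ tail) hmeas hInv₁ (by omega) (by omega)
              have hcomp₂ : pvComp s d memo₁ ≤ pvComp s d memo₂ :=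
                pvComp_mono s d (fun p hp => pvLe_contains hle₂ p hp)
              obtain ⟨memo₃, n', hInv₃, hle₃, hcl₃, hcone₃, hcomp₃, hbud₃, hrun₃⟩ :=
                IHL (fun q hq => hshape q (List.mem_cons_of_mem _ hq)) memo₂ tail hInv₂
                  (le_trans hcomp₁ hcomp₂)
              refine ⟨memo₃, n_q + n', hInv₃, fun p v h => hle₃ p v (hle₂ p v h), ?_, ?_,
                le_trans hcomp₂ hcomp₃, ?_, ?_⟩
              · intro q' hq'
                rcases List.mem_cons.mp hq' with rfl | hmem
                · exact pvLe_contains hle₃ _ hcq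
                · exact hcl₃ q' hmem
              · intro x' y' h0 h1
                by_cases hmid : memo₂.contains ((x' : Int), (y' : Int)) = true
                · obtain ⟨hx', hy'⟩ := hcone₂ x' y' h0 hmid
                  refine ⟨by omega, by omega, ?_⟩
                  rintro ⟨rfl, rfl⟩
                  omega
                · have hmid' : memo₂.contains ((x' : Int), (y' : Int)) = false := by
                    revert hmid; cases memo₂.contains ((x' : Int), (y' : Int)) <;> simp
                  exact hcone₃ x' y' hmid' h1
              · have hlen : (((x : Int), (y : Int)) :: L').length = L'.length + 1 := rfl
                omega
              · intro fuel
                have e : fuel + (n_q + n') = (fuel + n') + n_q := by omega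
                rw [e, List.cons_append, hrun₂ (fuel + n'), hrun₃ fuel]
          obtain ⟨memoK, nL, hInvK, hleK, hclK, hconeK, hcompK, hbudK, hrunK⟩ :=
            hres _ hLshape memo ((((a : Nat) : Int), ((b : Nat) : Int)) :: rest) hInv (le_refl _)
          have hckf : memoK.contains (((a : Nat) : Int), ((b : Nat) : Int)) = false := by
            by_cases h : memoK.contains (((a : Nat) : Int), ((b : Nat) : Int)) = true
            · obtain ⟨_, _, hne⟩ := hconeK a b hc' h
              exact absurd ⟨rfl, rfl⟩ hne
            · revert h; cases memoK.contains (((a : Nat) : Int), ((b : Nat) : Int)) <;> simp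
          have hdepsK : ∀ q ∈ pvDepsB ((a : Nat) : Int) ((b : Nat) : Int),
              memoK.contains q = true := by
            intro q hq
            by_cases hq0 : memo.contains q = true
            · exact pvLe_contains hleK q hq0
            · have hq0' : memo.contains q = false := by
                revert hq0; cases memo.contains q <;> simp
              refine hclK q ?_
              rw [List.mem_reverse]
              exact List.mem_filter.mpr ⟨hq, by rw [hq0']; rfl⟩
          have hmK : (pvDepsB ((a : Nat) : Int) ((b : Nat) : Int)).filter
              (fun q => !(memoK.contains q)) = [] := by
            rw [List.filter_eq_nil_iff]
            intro q hq
            rw [hdepsK q hq]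
            simp
          have hvK := pvVal hInvK a b hz hdepsK
          have hmonoK : ∀ q, memoK.contains q = true →
              (memoK.insert (((a : Nat) : Int), ((b : Nat) : Int))
                ((PySem.List.max? ((pvDepsB ((a : Nat) : Int) ((b : Nat) : Int)).map
                    (fun q => memoK.getD q 0)) (fun x => x)).getD 0
                  + PySem.List.pyGetD (PySem.List.pyGetD m ((a : Nat) : Int) [])
                      ((b : Nat) : Int) 0)).contains q = true :=
            fun q hq => pvLe_contains (pvLe_insert memoK _ _ hckf) q hq
          refine ⟨_, nL + 2,
            pvInv_insert hInvK a b ha hb hvK,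
            fun p v h => pvLe_insert memoK _ _ hckf p v (hleK p v h),
            PySem.Dict.contains_insert_self _ _ _, ?_, ?_, ?_⟩
          · intro x y h0 h1
            by_cases hmid : memoK.contains ((x : Int), (y : Int)) = true
            · obtain ⟨hx, hy, _⟩ := hconeK x y h0 hmid
              exact ⟨hx, hy⟩
            · have hmid' : memoK.contains ((x : Int), (y : Int)) = false := by
                revert hmid; cases memoK.contains ((x : Int), (y : Int)) <;> simp
              rw [PySem.Dict.contains_insert, hmid', Bool.or_false] at h1
              have he := eq_of_beq h1
              injection he with e1 e2
              constructor <;> omega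
          · have hlt' := pvComp_lt s d hmonoK a b ha hb hckf
              (PySem.Dict.contains_insert_self _ _ _)
            have hlen : ((pvDepsB ((a : Nat) : Int) ((b : Nat) : Int)).filter
                (fun q => !(memo.contains q))).reverse.length ≤ 3 := by
              rw [List.length_reverse]
              exact le_trans (List.length_filter_le _ _) (pvDeps_len _ _)
            omega
          · intro fuel
            have e : fuel + (nL + 2) = (((fuel + 1) + nL) + 1 : Nat) := by omega
            rw [e, pvLoopB_cons, if_neg (by simp [hc']), if_neg hzi, if_pos hm,
              hrunK (fuel + 1), pvLoopB_cons, if_neg (by simp [hckf]), if_neg hzi,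
              if_neg (show ¬((pvDepsB ((a : Nat) : Int) ((b : Nat) : Int)).filter
                (fun q => !(memoK.contains q)) ≠ []) from fun h => h hmK)]

lemma pvB_eq (m : List (List Int)) (s d : Nat) :
    Find_cost_alt m (s : Int) (d : Int) = pvG m s d := by
  have hInv0 : pvInv m s d PySem.Dict.empty := by
    intro p v h
    rw [PySem.Dict.get?_empty] at h
    cases h
  obtain ⟨memo', n, hInv', hle, hcont, hcone, hbud, hrun⟩ :=
    pvResolve m s d ((s + d + 1) * ((s + 1) * (d + 1)) + (s + d) + 1) s d PySem.Dict.empty []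
      (by
        have h1 : (s + d + 1) * ((s + 1) * (d + 1) - pvComp s d PySem.Dict.empty)
            ≤ (s + d + 1) * ((s + 1) * (d + 1)) :=
          Nat.mul_le_mul_left _ (Nat.sub_le _ _)
        omega)
      hInv0 (le_refl s) (le_refl d)
  have hn : n ≤ 1 + 5 * ((s + 1) * (d + 1)) := by
    have := pvComp_le_total s d memo'
    omega
  have hfuel : 5 * (((s : Int).toNat + 1) * ((d : Int).toNat + 1)) + 2
      = (5 * ((s + 1) * (d + 1)) + 2 - n) + n := by
    have ts : ((s : Int)).toNat = s := by omega
    have td : ((d : Int)).toNat = d := by omega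
    rw [ts, td]
    omega
  simp only [Find_cost_alt]
  rw [hfuel, hrun (5 * ((s + 1) * (d + 1)) + 2 - n), pvLoopB_nil]
  exact pvGetD_inv hInv' s d hcont

-- ===== VERDICT (by name: the statement is the Claim_ definition above) =====
theorem Find_cost_spec : Claim_equal_Find_cost := by
  intro m src dest _ hpre
  obtain ⟨h0, h1, h2, h3⟩ := hpre
  obtain ⟨s, rfl⟩ : ∃ s : Nat, src = (s : Int) := ⟨src.toNat, by omega⟩
  obtain ⟨d, rfl⟩ : ∃ d : Nat, dest = (d : Int) := ⟨dest.toNat, by omega⟩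
  unfold Spec_Find_cost
  rw [pvB_eq m s d, pvA_eq m s d (by omega) (fun i hi => by
    have := h3 i (by omega); omega)]
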